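-- pv_equiv track=rewrite | github.com/mrinxx/Pycharm | LISTAS Y TUPLAS/2.py | en_orden_ascendente
-- ===== SOURCE A (Python) =====
-- def en_orden_ascendente (lista): #creo la primera funcion para el primer objetivo del programa
--     ordenada=[] #inicializo una lista para almacenar los valores y a la vez ordenarla
--     for n in lista: #para cada valor que reciba la funcion en la lista
--         ordenada.append(n) #lo añade a la lista creada en la misma
--
--     ordenada.sort() #ordena la lista nueva
--
--     if lista == ordenada: #si la lista recibida es igual a la ordenada
--         r="True"
--     else: #si no
--         r="False"
--
--     return r #la funcion devolvera r
-- ===== SOURCE B (Python) =====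
-- def en_orden_ascendente(lista):
--     # single pass over adjacent pairs instead of sorting a copy and comparing
--     if all(x <= y for x, y in zip(lista, lista[1:])):
--         return "True"
--     else:
--         return "False"
-- ===== Notes on version B (the rewrite author's own statement) =====
-- stated objective: idiomatic
-- what changed: Replaces copy-then-sort-then-compare with a single pass checking each adjacent pair is non-decreasing (all over zip).
import Mathlib
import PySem

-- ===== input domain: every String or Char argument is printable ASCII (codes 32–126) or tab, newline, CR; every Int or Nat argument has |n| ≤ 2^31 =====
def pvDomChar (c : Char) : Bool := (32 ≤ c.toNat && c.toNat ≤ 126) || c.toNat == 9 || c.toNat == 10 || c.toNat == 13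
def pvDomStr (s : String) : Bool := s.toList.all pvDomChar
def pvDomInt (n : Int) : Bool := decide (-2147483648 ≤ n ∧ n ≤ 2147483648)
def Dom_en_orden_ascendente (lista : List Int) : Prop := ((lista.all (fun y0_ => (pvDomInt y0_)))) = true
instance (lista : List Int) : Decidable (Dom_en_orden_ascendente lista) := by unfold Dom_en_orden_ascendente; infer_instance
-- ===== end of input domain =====

-- B replaces A's copy-then-sort-then-compare with a single pass checking each adjacent pair is non-decreasing (idiomatic).

-- ===== PORT A =====
-- ordenada = [] ; for n in lista: ordenada.append(n) ; ordenada.sort() ; compare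
def en_orden_ascendente (lista : List Int) : String :=
  let ordenada : List Int := lista.foldl (fun acc n => acc ++ [n]) []
  let ordenada := PySem.List.sorted ordenada (fun x => x) false
  if lista = ordenada then "True" else "False"

-- ===== PORT B =====
-- all(x <= y for x, y in zip(lista, lista[1:]))
def pvAllPairsLe (ps : List (Int × Int)) : Bool :=
  ps.all (fun p => p.1 ≤ p.2)

def en_orden_ascendente_alt (lista : List Int) : String :=
  if pvAllPairsLe (lista.zip (PySem.List.slice lista (some 1) none)) then "True" else "False"

-- ===== PRECONDITION & SPEC =====
def Spec_en_orden_ascendente (lista : List Int) (out : String) : Prop := out = en_orden_ascendente_alt lista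
instance (lista : List Int) (out : String) : Decidable (Spec_en_orden_ascendente lista out) := by unfold Spec_en_orden_ascendente; infer_instance

-- ===== CLAIM (what is proved, stated in full; the proofs are below) =====
def Claim_equal_en_orden_ascendente : Prop := ∀ (lista : List Int), Dom_en_orden_ascendente lista → Spec_en_orden_ascendente lista (en_orden_ascendente lista)

-- ===== LEMMAS AND PROOFS =====

theorem pv_foldl_append_id (lista acc : List Int) :
    lista.foldl (fun acc n => acc ++ [n]) acc = acc ++ lista := by
  induction lista generalizing acc with
  | nil => simp
  | cons a t ih => simp [List.foldl, ih]

theorem pv_zip_tail_chain (lista : List Int) :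
    pvAllPairsLe (lista.zip lista.tail) = true ↔ List.IsChain (· ≤ ·) lista := by
  induction lista with
  | nil => simp [pvAllPairsLe]
  | cons a t ih =>
    cases t with
    | nil => simp [pvAllPairsLe]
    | cons b u =>
      simp only [List.tail_cons, List.zip_cons_cons, List.isChain_cons_cons]
      constructor
      · intro h
        simp only [pvAllPairsLe, List.all_cons, Bool.and_eq_true, decide_eq_true_eq] at h
        exact ⟨h.1, (ih).mp (by simpa [pvAllPairsLe] using h.2)⟩
      · intro h
        simp only [pvAllPairsLe, List.all_cons, Bool.and_eq_true, decide_eq_true_eq]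
        exact ⟨h.1, by simpa [pvAllPairsLe] using ih.mpr h.2⟩

theorem pv_sorted_eq_iff (lista : List Int) :
    lista = PySem.List.sorted lista (fun x => x) false ↔ lista.Pairwise (· ≤ ·) := by
  constructor
  · intro h
    have := PySem.List.sorted_pairwise (xs := lista) (key := fun x => x)
    rw [← h] at this
    exact this
  · intro h
    exact (PySem.List.sorted_eq_self_of_pairwise (xs := lista) (key := fun x => x) h).symm

-- ===== VERDICT (by name: the statement is the Claim_ definition above) =====
theorem en_orden_ascendente_spec : Claim_equal_en_orden_ascendente := by
  intro lista _
  show en_orden_ascendente lista = en_orden_ascendente_alt lista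
  unfold en_orden_ascendente en_orden_ascendente_alt
  have hslice : PySem.List.slice lista (some 1) none = lista.tail :=
    PySem.List.slice_from_one lista
  rw [pv_foldl_append_id, List.nil_append, hslice]
  by_cases h : lista = PySem.List.sorted lista (fun x => x) false
  · have hp : lista.Pairwise (· ≤ ·) := (pv_sorted_eq_iff lista).mp h
    have hc : pvAllPairsLe (lista.zip lista.tail) = true :=
      (pv_zip_tail_chain lista).mpr (List.isChain_iff_pairwise.mpr hp)
    rw [if_pos h, if_pos hc]
  · have hp : ¬ lista.Pairwise (· ≤ ·) := fun hp => h ((pv_sorted_eq_iff lista).mpr hp)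
    have hc : ¬ pvAllPairsLe (lista.zip lista.tail) = true := fun hc =>
      hp (List.isChain_iff_pairwise.mp ((pv_zip_tail_chain lista).mp hc))
    rw [if_neg h, if_neg hc]
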